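-- pv_equiv track=rewrite | github.com/boolsi/boolsi | boolsi/model.py | encode_state
-- ===== SOURCE A (Python) =====
-- def encode_state(substate_node_set, state):
--     """
--     Injectively encode state and its substate (with respect to given
--     subset of nodes) by (big) numbers.
--
--     :param state: state to encode
--     :param substate_node_set: nodes of the substate
--     :return: (state code, substate code)
--     """
--     state_code = 0
--     substate_code = 0
--     for node, node_state in enumerate(state):
--         if node_state:
--             code_increase = 1 << node
--             state_code += code_increase
--             if node in substate_node_set:
--                 substate_code += code_increase
--
--     return state_code, substate_code
-- ===== SOURCE B (Python) =====
-- def encode_state(substate_node_set, state):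
--     """Same result as A, computed as two separate sums: one pass over the
--     state for the state code, one pass over the (deduplicated) substate
--     node set for the substate code."""
--     state_code = sum(1 << node for node, node_state in enumerate(state) if node_state)
--     n = len(state)
--     substate_code = sum(1 << node for node in set(substate_node_set)
--                         if 0 <= node < n and state[node])
--     return state_code, substate_code
-- ===== Notes on version B (the rewrite author's own statement) =====
-- stated objective: alternative
-- what changed: A's single fused loop over the state with a membership test per true bit is replaced by two independent sums: one pass over enumerate(state) for the state code, and one pass over the deduplicated substate node set (indexing into state) for the substate code.
import Mathlib
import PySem

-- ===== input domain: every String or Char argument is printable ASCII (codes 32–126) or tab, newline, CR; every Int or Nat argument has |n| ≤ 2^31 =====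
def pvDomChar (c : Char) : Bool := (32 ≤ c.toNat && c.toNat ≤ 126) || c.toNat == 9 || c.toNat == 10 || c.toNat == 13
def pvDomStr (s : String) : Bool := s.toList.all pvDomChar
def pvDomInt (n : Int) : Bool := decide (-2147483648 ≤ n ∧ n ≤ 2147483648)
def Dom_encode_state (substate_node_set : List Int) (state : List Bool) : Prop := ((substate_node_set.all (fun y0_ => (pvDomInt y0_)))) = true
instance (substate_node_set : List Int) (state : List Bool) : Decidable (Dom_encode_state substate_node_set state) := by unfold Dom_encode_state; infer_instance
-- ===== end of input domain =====

-- B computes the two codes as two separate sums (one pass over the state, one over the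
-- deduplicated substate node set) instead of A's single fused loop; objective: alternative.


-- ===== PORT A =====
-- '1 << node': node is a nonnegative enumerate index, so Int.toNat is exact there.
def pvPow2 (i : Int) : Int := 1 <<< i.toNat

-- 'for node, node_state in enumerate(state)' with the two running accumulators.
def encode_state (substate_node_set : List Int) (state : List Bool) : Int × Int :=
  (PySem.List.enumerate state 0).foldl
    (fun (acc : Int × Int) (p : Int × Bool) =>
      if p.2 then
        ((acc.1 + pvPow2 p.1),
         (if p.1 ∈ substate_node_set then acc.2 + pvPow2 p.1 else acc.2))
      else acc)
    (0, 0)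

-- ===== PORT B =====
-- Two generator-expression sums: filter + map + sum over enumerate(state), and over
-- set(substate_node_set) (PySem.Set.ofList) with the in-range-and-true guard; 'state[node]'
-- under the 0 ≤ node < len guard is pyGetD (the default is never used).
def encode_state_alt (substate_node_set : List Int) (state : List Bool) : Int × Int :=
  let state_code : Int :=
    (((PySem.List.enumerate state 0).filter (fun p => p.2)).map (fun p => pvPow2 p.1)).sum
  let n : Int := (state.length : Int)
  let substate_code : Int :=
    (((PySem.Set.ofList substate_node_set).filter
        (fun node => decide (0 ≤ node) && decide (node < n) &&
          PySem.List.pyGetD state node false)).map pvPow2).sum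
  (state_code, substate_code)

-- ===== PRECONDITION & SPEC =====
def Spec_encode_state (substate_node_set : List Int) (state : List Bool) (out : Int × Int) : Prop := out = encode_state_alt substate_node_set state
instance (substate_node_set : List Int) (state : List Bool) (out : Int × Int) : Decidable (Spec_encode_state substate_node_set state out) := by unfold Spec_encode_state; infer_instance

-- ===== CLAIM (what is proved, stated in full; the proofs are below) =====
def Claim_equal_encode_state : Prop := ∀ (substate_node_set : List Int) (state : List Bool), Dom_encode_state substate_node_set state → Spec_encode_state substate_node_set state (encode_state substate_node_set state)

-- ===== LEMMAS AND PROOFS =====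

-- A's fused loop, characterised componentwise as two sums over filtered enumerate pairs.
theorem encode_state_foldl_char (s : List Int) (l : List (Int × Bool)) (a b : Int) :
    l.foldl
      (fun (acc : Int × Int) (p : Int × Bool) =>
        if p.2 then
          ((acc.1 + pvPow2 p.1),
           (if p.1 ∈ s then acc.2 + pvPow2 p.1 else acc.2))
        else acc)
      (a, b)
    = (a + ((l.filter (fun p => p.2)).map (fun p => pvPow2 p.1)).sum,
       b + ((l.filter (fun p => p.2 && decide (p.1 ∈ s))).map (fun p => pvPow2 p.1)).sum) := by
  induction l generalizing a b with
  | nil => simp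
  | cons p l ih =>
    by_cases hp : p.2 <;> by_cases hm : p.1 ∈ s <;>
      simp [hp, hm, ih, add_assoc]

-- The two "qualifying node" lists are nodup with the same members, hence the same sums.
theorem encode_state_snd_eq (s : List Int) (st : List Bool) :
    (((PySem.List.enumerate st 0).filter (fun p => p.2 && decide (p.1 ∈ s))).map
        (fun p => pvPow2 p.1)).sum
    = (((PySem.Set.ofList s).filter
          (fun node => decide (0 ≤ node) && decide (node < (st.length : Int)) &&
            PySem.List.pyGetD st node false)).map pvPow2).sum := by
  have hmap1 : (((PySem.List.enumerate st 0).filter (fun p => p.2 && decide (p.1 ∈ s))).map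
      (fun p => pvPow2 p.1))
      = ((((PySem.List.enumerate st 0).filter (fun p => p.2 && decide (p.1 ∈ s))).map
          Prod.fst).map pvPow2) := by
    simp [List.map_map, Function.comp]
  rw [hmap1]
  set L1 : List Int :=
    (((PySem.List.enumerate st 0).filter (fun p => p.2 && decide (p.1 ∈ s))).map Prod.fst) with hL1
  set L2 : List Int :=
    ((PySem.Set.ofList s).filter
      (fun node => decide (0 ≤ node) && decide (node < (st.length : Int)) &&
        PySem.List.pyGetD st node false)) with hL2
  have hpw : ((PySem.List.enumerate st 0).filter
      (fun p => p.2 && decide (p.1 ∈ s))).Pairwise (fun p q => p.1 < q.1) :=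
    (PySem.List.pairwise_lt_enumerate st 0).sublist (List.filter_sublist)
  have hnd1 : L1.Nodup := by
    rw [hL1]
    exact List.Pairwise.map Prod.fst (fun a b h => ne_of_lt h) hpw
  have hnd2 : L2.Nodup := (PySem.Set.nodup_ofList s).filter _
  have hmem : ∀ x : Int, x ∈ L1 ↔ x ∈ L2 := by
    intro x
    rw [hL1, hL2]
    constructor
    · intro hx
      obtain ⟨p, hpf, rfl⟩ := List.mem_map.1 hx
      obtain ⟨hpe, hc⟩ := List.mem_filter.1 hpf
      obtain ⟨k, hk, rfl⟩ := (PySem.List.mem_enumerate_iff st 0 _).1 hpe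
      simp only [Bool.and_eq_true, decide_eq_true_eq] at hc
      refine List.mem_filter.2 ⟨?_, ?_⟩
      · simpa using hc.2
      · simp [hk, hc.1]
    · intro hx
      obtain ⟨hmem2, hc⟩ := List.mem_filter.1 hx
      simp only [Bool.and_eq_true, decide_eq_true_eq] at hc
      obtain ⟨⟨hx0, hxlt⟩, hget⟩ := hc
      have hklt : x.toNat < st.length := by omega
      refine List.mem_map.2 ⟨(x, st[x.toNat]), List.mem_filter.2 ⟨?_, ?_⟩, rfl⟩
      · exact (PySem.List.mem_enumerate_iff st 0 _).2 ⟨x.toNat, hklt, by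
          simp [Int.toNat_of_nonneg hx0]⟩
      · have hxcast : x = ((x.toNat : Nat) : Int) := (Int.toNat_of_nonneg hx0).symm
        have : PySem.List.pyGetD st x false = st[x.toNat] := by
          conv_lhs => rw [hxcast, PySem.List.pyGetD_natCast]
          exact List.getD_eq_getElem st false hklt
        simp only [Bool.and_eq_true, decide_eq_true_eq]
        refine ⟨this ▸ hget, ?_⟩
        simpa using hmem2
  have hperm : L1.Perm L2 := (List.perm_ext_iff_of_nodup hnd1 hnd2).mpr hmem
  exact (hperm.map pvPow2).sum_eq

-- ===== VERDICT (by name: the statement is the Claim_ definition above) =====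
theorem encode_state_spec : Claim_equal_encode_state := by
  intro s st _
  unfold Spec_encode_state encode_state encode_state_alt
  rw [encode_state_foldl_char s (PySem.List.enumerate st 0) 0 0]
  simp only [zero_add]
  exact Prod.ext rfl (encode_state_snd_eq s st)
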